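-- pv_equiv track=rewrite | github.com/LeTranQuocKhanh/Translator | Translator.py | name_file_after_translate
-- ===== SOURCE A (Python) =====
-- def name_file_after_translate(main_path, suffix='.vi'):
--     name_file_after_translate_arr = main_path.split('\/').pop()
--     name_file_after_translate_arr = name_file_after_translate_arr.split('.')
--     name_file_after_translate_arr[len(name_file_after_translate_arr)-2] += suffix
--     name_file_after_translate = ''
--     for i in range(0,len(name_file_after_translate_arr)):
--         if i == len(name_file_after_translate_arr) -1:
--             name_file_after_translate += name_file_after_translate_arr[i]
--         else:
--             name_file_after_translate += name_file_after_translate_arr[i] + '.'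
--     return name_file_after_translate
-- ===== SOURCE B (Python) =====
-- def name_file_after_translate(main_path, suffix='.vi'):
--     name = main_path.split('\/').pop()
--     idx = name.rfind('.')
--     if idx == -1:
--         return name + suffix
--     return name[:idx] + suffix + name[idx:]
-- ===== Notes on version B (the rewrite author's own statement) =====
-- stated objective: simpler
-- what changed: Instead of splitting the name into a list on '.', mutating the second-to-last element and re-joining with an index loop, B locates the last dot with rfind and inserts the suffix by string slicing; no list is built and no join loop runs.
import Mathlib
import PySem

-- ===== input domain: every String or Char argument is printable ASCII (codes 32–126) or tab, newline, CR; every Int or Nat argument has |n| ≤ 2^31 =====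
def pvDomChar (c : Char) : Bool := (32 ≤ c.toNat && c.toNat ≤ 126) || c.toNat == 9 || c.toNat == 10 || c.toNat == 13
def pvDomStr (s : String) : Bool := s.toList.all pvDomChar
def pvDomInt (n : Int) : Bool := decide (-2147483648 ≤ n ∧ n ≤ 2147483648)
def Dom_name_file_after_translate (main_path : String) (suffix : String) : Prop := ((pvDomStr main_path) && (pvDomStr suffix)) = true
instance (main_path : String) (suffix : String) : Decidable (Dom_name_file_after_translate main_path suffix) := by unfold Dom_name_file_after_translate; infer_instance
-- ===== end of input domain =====

-- B replaces A's split-on-'.'/mutate/re-join loop by a single rfind + slice insertion (objective: simpler).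
-- Both functions are total; A's list.pop() runs on the never-empty result of split, so no Pre_ is needed.

-- ===== PORT A =====
-- Python A: name = main_path.split('\/').pop(); arr = name.split('.');
-- arr[len(arr)-2] += suffix; then an index loop joins the pieces with '.'.
def name_file_after_translate (main_path : String) (suffix : String) : String :=
  match PySem.List.pop? (PySem.Chars.splitOn main_path.toList ['\\', '/']) with
  | none => ""   -- unreachable: str.split always returns a non-empty list
  | some (name, _) =>
    let arr := PySem.Chars.splitOn name ['.']
    let n : Int := (arr.length : Int)
    let arr := PySem.List.pySetD arr (n - 2) (PySem.List.pyGetD arr (n - 2) [] ++ suffix.toList)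
    let res := (PySem.List.pyRange 0 n).foldl (fun acc i =>
        if i = n - 1 then acc ++ PySem.List.pyGetD arr i []
        else acc ++ PySem.List.pyGetD arr i [] ++ ['.']) []
    String.ofList res

-- ===== PORT B =====
-- Python B: name = main_path.split('\/').pop(); idx = name.rfind('.');
-- no dot: name + suffix; else name[:idx] + suffix + name[idx:].
def name_file_after_translate_alt (main_path : String) (suffix : String) : String :=
  match PySem.List.pop? (PySem.Chars.splitOn main_path.toList ['\\', '/']) with
  | none => ""   -- unreachable: str.split always returns a non-empty list
  | some (name, _) =>
    let idx := PySem.Chars.rfind name ['.']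
    if idx = -1 then String.ofList name ++ suffix
    else String.ofList (PySem.List.slice name none (some idx)) ++ suffix ++
         String.ofList (PySem.List.slice name (some idx) none)

-- ===== PRECONDITION & SPEC =====
def Spec_name_file_after_translate (main_path : String) (suffix : String) (out : String) : Prop := out = name_file_after_translate_alt main_path suffix
instance (main_path : String) (suffix : String) (out : String) : Decidable (Spec_name_file_after_translate main_path suffix out) := by unfold Spec_name_file_after_translate; infer_instance

-- ===== CLAIM (what is proved, stated in full; the proofs are below) =====
def Claim_equal_name_file_after_translate : Prop := ∀ (main_path : String) (suffix : String), Dom_name_file_after_translate main_path suffix → Spec_name_file_after_translate main_path suffix (name_file_after_translate main_path suffix)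

-- ===== LEMMAS AND PROOFS =====

/-- Clean recursive model of `name.split('.')` (single-char separator). -/
def splitDot : List Char → List (List Char)
  | [] => [[]]
  | c :: t => if c = '.' then [] :: splitDot t
              else ((c :: (splitDot t).headI) :: (splitDot t).tail)

/-- Clean recursive model of `name.rfind('.')`. -/
def rfd : List Char → Int
  | [] => -1
  | c :: t => if rfd t = -1 then (if c = '.' then 0 else -1) else rfd t + 1

theorem splitDot_ne_nil (l : List Char) : splitDot l ≠ [] := by
  cases l with
  | nil => simp [splitDot]
  | cons c t => simp only [splitDot]; split <;> simp

theorem headI_cons_tail {α : Type} [Inhabited α] (l : List α) (h : l ≠ []) : l.headI :: l.tail = l := by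
  cases l with
  | nil => exact absurd rfl h
  | cons a t => rfl

theorem splitOn_go_spec : ∀ (fuel : Nat) (l cur : List Char) (acc : List (List Char)),
    l.length < fuel →
    PySem.Chars.splitOn.go ['.'] fuel l cur acc =
      acc.reverse ++ (cur.reverse ++ (splitDot l).headI) :: (splitDot l).tail := by
  intro fuel
  induction fuel with
  | zero => intro l cur acc h; omega
  | succ m ih =>
    intro l cur acc h
    cases l with
    | nil =>
      rw [PySem.Chars.splitOn.go.eq_def]
      simp [splitDot]
    | cons c t =>
      rw [PySem.Chars.splitOn.go.eq_def]
      by_cases hc : c = '.'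
      · subst hc
        have hp : List.isPrefixOf ['.'] ('.' :: t) = true := by
          simp [List.isPrefixOf]
        simp only [hp, if_pos, List.length_singleton, List.drop_succ_cons, List.drop_zero]
        rw [ih t [] (cur.reverse :: acc) (by simp at h ⊢; omega)]
        have hne := splitDot_ne_nil t
        simp [splitDot]
        exact headI_cons_tail _ hne
      · have hp : List.isPrefixOf ['.'] (c :: t) = false := by
          simp [List.isPrefixOf]
          exact fun h' => hc h'.symm
        simp only [hp, Bool.false_eq_true, if_false]
        rw [ih t (c :: cur) acc (by simp at h ⊢; omega)]
        simp [splitDot, hc]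

theorem splitOn_eq_splitDot (l : List Char) : PySem.Chars.splitOn l ['.'] = splitDot l := by
  show PySem.Chars.splitOn.go ['.'] (l.length + 1) l [] [] = splitDot l
  rw [splitOn_go_spec (l.length + 1) l [] [] (by omega)]
  simp
  exact headI_cons_tail _ (splitDot_ne_nil l)

theorem rfind_go_step (c : Char) (t : List Char) : ∀ (k : Nat), k ≤ t.length →
    PySem.Chars.rfind.go (c :: t) ['.'] (k + 1) =
      (if PySem.Chars.rfind.go t ['.'] k = -1 then (if c = '.' then (0 : Int) else -1)
       else PySem.Chars.rfind.go t ['.'] k + 1) := by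
  intro k
  induction k with
  | zero =>
    intro hk
    rw [PySem.Chars.rfind.go.eq_def]
    simp only [List.drop_succ_cons, List.drop_zero]
    rw [PySem.Chars.rfind.go.eq_def]
    rw [PySem.Chars.rfind.go.eq_def]
    by_cases hp : List.isPrefixOf ['.'] t = true
    · simp [hp]
    · simp only [Bool.not_eq_true] at hp
      simp [hp]
      by_cases hc : c = '.'
      · simp [hc, List.isPrefixOf]
      · have : List.isPrefixOf ['.'] (c :: t) = false := by
          simp [List.isPrefixOf]; exact fun h' => hc h'.symm
        simp [this, hc]
        exact fun h' => hc h'.symm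
  | succ j ihj =>
    intro hk
    rw [PySem.Chars.rfind.go.eq_def]
    simp only [List.drop_succ_cons]
    conv_rhs => rw [PySem.Chars.rfind.go.eq_def]
    simp only []
    by_cases hp : List.isPrefixOf ['.'] (List.drop (j + 1) t) = true
    · simp only [hp, if_pos]
      have h1 : ((j:Int) + 1 + 1 : Int) ≠ 0 - 1 := by omega
      push_cast
      split_ifs <;> omega
    · simp only [Bool.not_eq_true] at hp
      simp only [hp, Bool.false_eq_true, if_false]
      exact ihj (by omega)

theorem rfind_eq_rfd (l : List Char) : PySem.Chars.rfind l ['.'] = rfd l := by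
  induction l with
  | nil =>
    show PySem.Chars.rfind.go [] ['.'] 0 = -1
    rw [PySem.Chars.rfind.go.eq_def]
    simp [List.isPrefixOf]
  | cons c t ih =>
    show PySem.Chars.rfind.go (c :: t) ['.'] (t.length + 1) = rfd (c :: t)
    rw [rfind_go_step c t t.length (le_refl _)]
    have : PySem.Chars.rfind.go t ['.'] t.length = rfd t := ih
    rw [this]
    rfl

theorem rfd_ge (l : List Char) : -1 ≤ rfd l := by
  induction l with
  | nil => simp [rfd]
  | cons c t ih => simp only [rfd]; split_ifs <;> omega

/-- The for-loop in A joins the pieces with '.'. -/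
theorem loop_join (parts : List (List Char)) : ∀ (a : Nat) (acc : List Char),
    a ≤ parts.length →
    (PySem.List.pyRange a (parts.length : Int)).foldl (fun acc i =>
        if i = (parts.length : Int) - 1 then acc ++ PySem.List.pyGetD parts i []
        else acc ++ PySem.List.pyGetD parts i [] ++ ['.']) acc
      = acc ++ PySem.Chars.join ['.'] (parts.drop a) := by
  intro a
  induction h : parts.length - a using Nat.strong_induction_on generalizing a with
  | _ fuel ih =>
    intro acc ha
    rcases Nat.eq_or_lt_of_le ha with heq | hlt
    · rw [PySem.List.pyRange_one_eq_nil (by omega)]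
      simp [heq, PySem.Chars.join_nil]
    · rw [PySem.List.pyRange_one_cons (by exact_mod_cast hlt)]
      simp only [List.foldl_cons]
      have hget : PySem.List.pyGetD parts (a : Int) [] = parts[a] := by
        rw [PySem.List.pyGetD_natCast]
        exact List.getD_eq_getElem _ _ hlt
      have hdrop : parts.drop a = parts[a] :: parts.drop (a + 1) :=
        List.drop_eq_getElem_cons hlt
      have hcast : ((a : Int) + 1) = ((a + 1 : Nat) : Int) := by push_cast; ring
      by_cases hlast : a = parts.length - 1
      · have hif : ((a : Int) = (parts.length : Int) - 1) := by omega
        simp only [if_pos hif, hget]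
        rw [hcast, ih 0 (by omega) (a + 1) (by omega) _ (by omega)]
        have : parts.drop (a + 1) = [] := List.drop_eq_nil_of_le (by omega)
        rw [this, hdrop, this]
        simp [PySem.Chars.join_nil, PySem.Chars.join_singleton]
      · have hif : ¬ ((a : Int) = (parts.length : Int) - 1) := by omega
        simp only [if_neg hif, hget]
        rw [hcast, ih (parts.length - (a + 1)) (by omega) (a + 1) rfl _ (by omega)]
        have h2 : a + 1 < parts.length := by omega
        have hdrop2 : parts.drop (a + 1) = parts[a+1] :: parts.drop (a + 2) :=
          List.drop_eq_getElem_cons h2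
        rw [hdrop, hdrop2, PySem.Chars.join_cons_cons]
        simp [List.append_assoc]

/-- A's core on the popped name, at the character level. -/
def acore (l s : List Char) : List Char :=
  let arr := splitDot l
  let n : Int := (arr.length : Int)
  PySem.Chars.join ['.'] (PySem.List.pySetD arr (n - 2) (PySem.List.pyGetD arr (n - 2) [] ++ s))

/-- B's core on the popped name, at the character level. -/
def bcore (l s : List Char) : List Char :=
  if rfd l = -1 then l ++ s
  else l.take (rfd l).toNat ++ s ++ l.drop (rfd l).toNat

/-- `jmod X s`: set-index-(len-2)-and-join, the natural-index form of A's core. -/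
def jmod (X : List (List Char)) (s : List Char) : List Char :=
  PySem.Chars.join ['.'] (X.set (X.length - 2) (X.getD (X.length - 2) [] ++ s))

theorem splitDot_of_rfd_neg : ∀ (t : List Char), rfd t = -1 → splitDot t = [t] := by
  intro t
  induction t with
  | nil => intro _; rfl
  | cons c t ih =>
    intro h
    have hge := rfd_ge t
    simp only [rfd] at h
    by_cases hn : rfd t = -1
    · rw [if_pos hn] at h
      by_cases hc : c = '.'
      · rw [if_pos hc] at h; omega
      · simp [splitDot, hc, ih hn]
    · rw [if_neg hn] at h; omega

theorem splitDot_len_of_rfd_nonneg : ∀ (t : List Char), 0 ≤ rfd t → 2 ≤ (splitDot t).length := by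
  intro t
  induction t with
  | nil => intro h; simp [rfd] at h
  | cons c t ih =>
    intro h
    by_cases hc : c = '.'
    · have := splitDot_ne_nil t
      simp only [splitDot, if_pos hc, List.length_cons]
      cases hsp : splitDot t with
      | nil => exact absurd hsp this
      | cons a b => simp
    · simp only [rfd] at h
      by_cases hn : rfd t = -1
      · rw [if_pos hn, if_neg hc] at h; omega
      · have h0 : 0 ≤ rfd t := by have := rfd_ge t; omega
        have h2 := ih h0
        simp only [splitDot, if_neg hc, List.length_cons]
        have : splitDot t = (splitDot t).headI :: (splitDot t).tail :=
          (headI_cons_tail _ (splitDot_ne_nil t)).symm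
        rw [this] at h2
        simp at h2 ⊢
        omega

theorem acore_nat (l s : List Char) (h2 : 2 ≤ (splitDot l).length) :
    acore l s = jmod (splitDot l) s := by
  have hc : ((splitDot l).length : Int) - 2 = (((splitDot l).length - 2 : Nat) : Int) := by omega
  simp only [acore, jmod, hc, PySem.List.pySetD_natCast, PySem.List.pyGetD_natCast]

theorem acore_singleton (l s : List Char) (x : List Char) (hx : splitDot l = [x]) :
    acore l s = x ++ s := by
  simp [acore, hx, PySem.List.pySetD, PySem.List.pySet?, PySem.List.pyGetD,
    PySem.List.pyGet?, PySem.List.pyIdx?, PySem.Chars.join_singleton]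

theorem jmod_nil_cons (pt : List (List Char)) (s : List Char) (h2 : 2 ≤ pt.length) :
    jmod ([] :: pt) s = '.' :: jmod pt s := by
  cases pt with
  | nil => simp at h2
  | cons q r =>
    cases r with
    | nil => simp at h2
    | cons r0 r1 =>
      simp only [jmod, List.length_cons]
      have e1 : r1.length + 1 + 1 + 1 - 2 = (r1.length + 1 + 1 - 2) + 1 := by omega
      rw [e1, List.getD_cons_succ, List.set_cons_succ]
      have hne : (q :: r0 :: r1).set (r1.length + 1 + 1 - 2) ((q :: r0 :: r1).getD (r1.length + 1 + 1 - 2) [] ++ s) =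
          ((q :: r0 :: r1).set (r1.length + 1 + 1 - 2) ((q :: r0 :: r1).getD (r1.length + 1 + 1 - 2) [] ++ s)).headI ::
          ((q :: r0 :: r1).set (r1.length + 1 + 1 - 2) ((q :: r0 :: r1).getD (r1.length + 1 + 1 - 2) [] ++ s)).tail := by
        refine (headI_cons_tail _ ?_).symm
        intro hnil
        have := congrArg List.length hnil
        simp at this
      rw [hne, PySem.Chars.join_cons_cons, ← hne]
      simp

theorem jmod_cons_head (c : Char) (h : List Char) (tl : List (List Char)) (s : List Char)
    (htl : tl ≠ []) : jmod ((c :: h) :: tl) s = c :: jmod (h :: tl) s := by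
  cases tl with
  | nil => exact absurd rfl htl
  | cons q r =>
    cases r with
    | nil =>
      simp only [jmod, List.length_cons, List.length_nil]
      norm_num
      rw [PySem.Chars.join_cons_cons, PySem.Chars.join_cons_cons]
      simp [PySem.Chars.join_singleton]
    | cons r0 r1 =>
      simp only [jmod, List.length_cons]
      have e1 : r1.length + 1 + 1 + 1 - 2 = (r1.length + 1 + 1 - 2) + 1 := by omega
      rw [e1, List.getD_cons_succ, List.set_cons_succ, List.getD_cons_succ, List.set_cons_succ]
      have e2 : r1.length + 1 + 1 - 2 = r1.length := by omega
      rw [e2]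
      have hne : (q :: r0 :: r1).set r1.length ((q :: r0 :: r1).getD r1.length [] ++ s) =
          ((q :: r0 :: r1).set r1.length ((q :: r0 :: r1).getD r1.length [] ++ s)).headI ::
          ((q :: r0 :: r1).set r1.length ((q :: r0 :: r1).getD r1.length [] ++ s)).tail := by
        refine (headI_cons_tail _ ?_).symm
        intro hnil
        have := congrArg List.length hnil
        simp at this
      rw [hne, PySem.Chars.join_cons_cons, PySem.Chars.join_cons_cons, ← hne]
      simp

theorem bcore_cons_pos (c : Char) (t s : List Char) (h0 : 0 ≤ rfd t) :
    bcore (c :: t) s = c :: bcore t s := by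
  have hn : ¬ rfd t = -1 := by omega
  simp only [bcore, rfd, if_neg hn]
  rw [if_neg (by omega : ¬ rfd t + 1 = -1)]
  have ht : (rfd t + 1).toNat = (rfd t).toNat + 1 := by omega
  rw [ht]
  simp [List.take_succ_cons, List.drop_succ_cons]

theorem acore_eq_bcore (l s : List Char) : acore l s = bcore l s := by
  induction l with
  | nil =>
    rw [acore_singleton [] s [] rfl]
    simp [bcore, rfd]
  | cons c t ih =>
    by_cases hneg : rfd t = -1
    · have hsp := splitDot_of_rfd_neg t hneg
      by_cases hc : c = '.'
      · subst hc
        have hsp2 : splitDot ('.' :: t) = [[], t] := by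
          simp [splitDot, hsp]
        rw [acore_nat _ s (by rw [hsp2]; simp)]
        rw [hsp2]
        have hb : rfd ('.' :: t) = 0 := by simp [rfd, hneg]
        simp [jmod, bcore, hb, PySem.Chars.join_cons_cons, PySem.Chars.join_singleton]
      · have hsp2 : splitDot (c :: t) = [c :: t] := by
          simp [splitDot, hsp, hc]
        rw [acore_singleton _ s _ hsp2]
        have hb : rfd (c :: t) = -1 := by simp [rfd, hneg, hc]
        simp [bcore, hb]
    · have h0 : 0 ≤ rfd t := by have := rfd_ge t; omega
      have hlen := splitDot_len_of_rfd_nonneg t h0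
      rw [bcore_cons_pos c t s h0, ← ih]
      have hpt : splitDot t = (splitDot t).headI :: (splitDot t).tail :=
        (headI_cons_tail _ (splitDot_ne_nil t)).symm
      have htl : (splitDot t).tail ≠ [] := by
        intro hnil
        rw [hpt, hnil] at hlen
        simp at hlen
      rw [acore_nat t s hlen]
      by_cases hc : c = '.'
      · subst hc
        have hsp2 : splitDot ('.' :: t) = [] :: splitDot t := by simp [splitDot]
        rw [acore_nat _ s (by rw [hsp2]; simp [hpt.symm ▸ hlen]; omega), hsp2,
          jmod_nil_cons _ _ hlen]
      · have hsp2 : splitDot (c :: t) = (c :: (splitDot t).headI) :: (splitDot t).tail := by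
          simp [splitDot, hc]
        have hlen2 : 2 ≤ (splitDot (c :: t)).length := by
          rw [hsp2]
          rw [hpt] at hlen
          simp at hlen ⊢
          omega
        rw [acore_nat _ s hlen2, hsp2, jmod_cons_head c _ _ s htl, ← hpt]

-- ===== VERDICT (by name: the statement is the Claim_ definition above) =====
theorem ofList_eq_iff (a : List Char) (b : String) : String.ofList a = b ↔ a = b.toList := by
  constructor
  · intro h; rw [← h, String.toList_ofList]
  · intro h; rw [h]; exact String.toList_inj.mp (by simp)

theorem name_file_after_translate_spec : Claim_equal_name_file_after_translate := by
  intro main_path suffix _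
  unfold Spec_name_file_after_translate name_file_after_translate name_file_after_translate_alt
  cases hpop : PySem.List.pop? (PySem.Chars.splitOn main_path.toList ['\\', '/']) with
  | none => rfl
  | some p =>
    obtain ⟨name, rest⟩ := p
    simp only []
    -- reduce A's loop to a join over the modified list
    set arr0 := PySem.Chars.splitOn name ['.'] with harr0
    set arr1 := PySem.List.pySetD arr0 ((arr0.length : Int) - 2)
      (PySem.List.pyGetD arr0 ((arr0.length : Int) - 2) [] ++ suffix.toList) with harr1
    have hlen : (arr0.length : Int) = (arr1.length : Int) := by
      rw [harr1, PySem.List.length_pySetD]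
    have hloop := loop_join arr1 0 [] (by omega)
    simp only [Nat.cast_zero] at hloop
    rw [hlen, hloop]
    simp only [List.drop_zero, List.nil_append]
    have hA : arr1 = PySem.List.pySetD (splitDot name) (((splitDot name).length : Int) - 2)
        (PySem.List.pyGetD (splitDot name) (((splitDot name).length : Int) - 2) [] ++ suffix.toList) := by
      rw [harr1, harr0, splitOn_eq_splitDot]
    have hacore : PySem.Chars.join ['.'] arr1 = acore name suffix.toList := by
      rw [hA]; rfl
    rw [hacore, acore_eq_bcore]
    -- B side
    rw [rfind_eq_rfd]
    by_cases hneg : rfd name = -1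
    · rw [if_pos hneg]
      rw [ofList_eq_iff]
      simp [bcore, hneg]
    · rw [if_neg hneg]
      have h0 : 0 ≤ rfd name := by have := rfd_ge name; omega
      rw [PySem.List.slice_to name h0, PySem.List.slice_from name h0]
      rw [ofList_eq_iff]
      simp [bcore, hneg]
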